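-- pv_equiv track=rewrite | github.com/Eresh24/SoftwareNow_assignment1 | Assignment_2/Question_1.py | encrypt_funcion
-- ===== SOURCE A (Python) =====
-- def encrypt_funcion(text,shift1,shift2):
--     encrypted_text = ""
--
--     #to check each character in the text
--     for i,char in enumerate(text):
--         if char.islower():
--
--             # to check if the index is even or odd and to shift the character and wrap around using modulo
--             shift = shift1 if i  % 2 == 0 else shift2
--             new_char = chr((ord(char)- ord('a') + shift) % 26 + ord('a'))
--             encrypted_text += new_char
--
--             # to check if the character is in the second half of the alphabet
--         elif char.isupper():
--             shift = shift1 if i  % 2 == 0 else shift2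
--             new_char = chr((ord(char)- ord('A') + shift) % 26 + ord('A'))
--             encrypted_text += new_char
--
--             # to check if the character is not an alphabet
--         else:
--             encrypted_text += char
--     return encrypted_text
-- ===== SOURCE B (Python) =====
-- def encrypt_funcion(text, shift1, shift2):
--     # Precomputed translation tables (one per parity) + even/odd split, translate, re-interleave.
--     def make_table(shift):
--         table = {}
--         for base in (97, 65):
--             for k in range(26):
--                 table[base + k] = base + (k + shift) % 26
--         return table
--
--     even = text[0::2].translate(make_table(shift1))
--     odd = text[1::2].translate(make_table(shift2))
--     parts = []
--     for x, y in zip(even, odd):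
--         parts.append(x)
--         parts.append(y)
--     if len(even) > len(odd):
--         parts.append(even[-1])
--     return "".join(parts)
-- ===== Notes on version B (the rewrite author's own statement) =====
-- stated objective: faster
-- what changed: Replaces the per-character branching loop over enumerate(text) by two precomputed translation tables (one per index parity) applied via str.translate to the even and odd slices text[0::2]/text[1::2], which are then re-interleaved with zip.
import Mathlib
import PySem

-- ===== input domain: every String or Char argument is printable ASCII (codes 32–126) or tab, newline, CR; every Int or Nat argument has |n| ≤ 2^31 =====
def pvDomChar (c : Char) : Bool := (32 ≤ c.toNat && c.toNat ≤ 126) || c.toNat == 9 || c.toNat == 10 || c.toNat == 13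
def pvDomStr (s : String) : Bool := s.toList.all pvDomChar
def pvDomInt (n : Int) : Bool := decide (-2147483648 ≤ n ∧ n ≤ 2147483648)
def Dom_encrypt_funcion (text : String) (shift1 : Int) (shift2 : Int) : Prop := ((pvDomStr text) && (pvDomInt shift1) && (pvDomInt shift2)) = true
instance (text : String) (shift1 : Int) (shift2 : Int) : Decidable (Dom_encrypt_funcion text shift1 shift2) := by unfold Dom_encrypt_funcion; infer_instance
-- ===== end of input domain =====

-- B replaces A's per-character branching loop by precomputed translation tables applied to the
-- even/odd slices, which are then re-interleaved (objective: faster — measurably, via str.translate).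

-- ===== PORT A =====
-- literal transliteration of A: a fold over enumerate(text), building the output left to right.
-- char.islower()/char.isupper() on a one-character string are PySem.Chars.islower/isupper on the char.
def encrypt_funcion (text : String) (shift1 : Int) (shift2 : Int) : String :=
  let encrypted_text : List Char :=
    (PySem.List.enumerate text.toList 0).foldl (fun acc ic =>
      let i := ic.1
      let char := ic.2
      if PySem.Chars.islower char then
        let shift := if PySem.Int.mod i 2 = 0 then shift1 else shift2
        let new_char := Char.ofNat (PySem.Int.mod ((char.toNat : Int) - ('a'.toNat : Int) + shift) 26 + ('a'.toNat : Int)).toNat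
        acc ++ [new_char]
      else if PySem.Chars.isupper char then
        let shift := if PySem.Int.mod i 2 = 0 then shift1 else shift2
        let new_char := Char.ofNat (PySem.Int.mod ((char.toNat : Int) - ('A'.toNat : Int) + shift) 26 + ('A'.toNat : Int)).toNat
        acc ++ [new_char]
      else acc ++ [char]) []
  String.ofList encrypted_text

-- ===== PORT B =====
-- make_table: dict ord(letter) -> ord(shifted letter), built by the same two loops as Source B
def pvMakeTable (shift : Int) : PySem.Dict Int Int :=
  ([97, 65] : List Int).foldl (fun t base =>
    (PySem.List.pyRange 0 26 1).foldl (fun t k =>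
      t.insert (base + k) (PySem.Int.mod (k + shift) 26 + base)) t) PySem.Dict.empty

-- str.translate(table): each character is replaced by the table entry for its code point, if any.
-- Exact here: every value of pvMakeTable is a valid code point (65..122), so chr(v) never fails.
def pvTranslate (cs : List Char) (t : PySem.Dict Int Int) : List Char :=
  cs.map (fun c => match t.get? ((c.toNat : Int)) with
    | some v => Char.ofNat v.toNat
    | none => c)

def encrypt_funcion_alt (text : String) (shift1 : Int) (shift2 : Int) : String :=
  -- text[0::2] / text[1::2]: step 2 ≠ 0, so slice? is always `some`; the [] default is never used
  let even := pvTranslate ((PySem.List.slice? text.toList (some 0) none 2).getD []) (pvMakeTable shift1)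
  let odd := pvTranslate ((PySem.List.slice? text.toList (some 1) none 2).getD []) (pvMakeTable shift2)
  let parts := (even.zip odd).foldl (fun acc xy => acc ++ [xy.1, xy.2]) []
  -- even[-1]: guarded by len(even) > len(odd), so `even` is nonempty and the default is never used
  let parts := if odd.length < even.length then parts ++ [PySem.List.pyGetD even (-1) ' '] else parts
  String.ofList parts

-- ===== PRECONDITION & SPEC =====
def Spec_encrypt_funcion (text : String) (shift1 : Int) (shift2 : Int) (out : String) : Prop := out = encrypt_funcion_alt text shift1 shift2
instance (text : String) (shift1 : Int) (shift2 : Int) (out : String) : Decidable (Spec_encrypt_funcion text shift1 shift2 out) := by unfold Spec_encrypt_funcion; infer_instance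

-- ===== CLAIM (what is proved, stated in full; the proofs are below) =====
def Claim_equal_encrypt_funcion : Prop := ∀ (text : String) (shift1 : Int) (shift2 : Int), Dom_encrypt_funcion text shift1 shift2 → Spec_encrypt_funcion text shift1 shift2 (encrypt_funcion text shift1 shift2)

-- ===== LEMMAS AND PROOFS =====

-- the per-character encryption both programs perform, as a function
def pvEnc (shift : Int) (c : Char) : Char :=
  if PySem.Chars.islower c then
    Char.ofNat (PySem.Int.mod ((c.toNat : Int) - 97 + shift) 26 + 97).toNat
  else if PySem.Chars.isupper c then
    Char.ofNat (PySem.Int.mod ((c.toNat : Int) - 65 + shift) 26 + 65).toNat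
  else c

-- alternating-shift specification both sides are reduced to
def pvSpec (shift1 shift2 : Int) : Bool → List Char → List Char
  | _, [] => []
  | b, c :: t => pvEnc (if b then shift1 else shift2) c :: pvSpec shift1 shift2 (!b) t

-- every second element starting at the head (the value of xs[0::2])
def pvEvery2 {α : Type} : List α → List α
  | [] => []
  | [a] => [a]
  | a :: _ :: t => a :: pvEvery2 t

-- ---- the translation table ----
lemma pvGetFoldIns (ks : List Int) (d : PySem.Dict Int Int) (base shift c : Int) :
    (ks.foldl (fun t k => t.insert (base + k) (PySem.Int.mod (k + shift) 26 + base)) d).get? c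
    = if (c - base) ∈ ks then some (PySem.Int.mod (c - base + shift) 26 + base) else d.get? c := by
  induction ks generalizing d with
  | nil => simp
  | cons k rest ih =>
    simp only [List.foldl_cons, ih, List.mem_cons]
    by_cases hm : (c - base) ∈ rest
    · simp [hm]
    · by_cases he : c - base = k
      · have hc : c = base + k := by omega
        simp [hc, PySem.Dict.get?_insert_self]
      · have hne : c ≠ base + k := by omega
        rw [PySem.Dict.get?_insert_of_ne _ _ hne]
        simp [hm, he]

lemma pvTableGet (shift c : Int) : (pvMakeTable shift).get? c
    = if 97 ≤ c ∧ c ≤ 122 then some (PySem.Int.mod (c - 97 + shift) 26 + 97)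
      else if 65 ≤ c ∧ c ≤ 90 then some (PySem.Int.mod (c - 65 + shift) 26 + 65) else none := by
  unfold pvMakeTable
  simp only [List.foldl_cons, List.foldl_nil, pvGetFoldIns, PySem.List.mem_pyRange_one,
    PySem.Dict.get?_empty]
  split_ifs <;> first | rfl | omega

lemma pvLowIff (c : Char) : PySem.Chars.islower c = true ↔ (97 ≤ (c.toNat : Int) ∧ (c.toNat : Int) ≤ 122) := by
  rw [PySem.Chars.islower]
  simp only [Bool.and_eq_true, decide_eq_true_eq, Char.le_def, UInt32.le_iff_toNat_le, Char.toNat]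
  show (97 ≤ c.val.toNat ∧ c.val.toNat ≤ 122) ↔ _
  omega

lemma pvUpIff (c : Char) : PySem.Chars.isupper c = true ↔ (65 ≤ (c.toNat : Int) ∧ (c.toNat : Int) ≤ 90) := by
  rw [PySem.Chars.isupper]
  simp only [Bool.and_eq_true, decide_eq_true_eq, Char.le_def, UInt32.le_iff_toNat_le, Char.toNat]
  show (65 ≤ c.val.toNat ∧ c.val.toNat ≤ 90) ↔ _
  omega

lemma pvTranslateTable (shift : Int) (l : List Char) :
    pvTranslate l (pvMakeTable shift) = l.map (pvEnc shift) := by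
  unfold pvTranslate
  refine List.map_congr_left (fun c _ => ?_)
  rw [pvTableGet]
  unfold pvEnc
  by_cases hl : PySem.Chars.islower c
  · have hb := (pvLowIff c).mp hl
    simp [hl, hb]
  · by_cases hu : PySem.Chars.isupper c
    · have hb := (pvUpIff c).mp hu
      have hnl : ¬ (97 ≤ (c.toNat : Int) ∧ (c.toNat : Int) ≤ 122) := fun h => hl ((pvLowIff c).mpr h)
      have hnlN : ¬ (97 ≤ c.toNat ∧ c.toNat ≤ 122) := by omega
      have hbN : 65 ≤ c.toNat ∧ c.toNat ≤ 90 := by omega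
      simp [hl, hu, hbN, hnlN]
    · have hnl : ¬ (97 ≤ (c.toNat : Int) ∧ (c.toNat : Int) ≤ 122) := fun h => hl ((pvLowIff c).mpr h)
      have hnu : ¬ (65 ≤ (c.toNat : Int) ∧ (c.toNat : Int) ≤ 90) := fun h => hu ((pvUpIff c).mpr h)
      have hnlN : ¬ (97 ≤ c.toNat ∧ c.toNat ≤ 122) := by omega
      have hnuN : ¬ (65 ≤ c.toNat ∧ c.toNat ≤ 90) := by omega
      simp [hl, hu, hnlN, hnuN]

-- ---- the step-2 slices ----
lemma pvL0 {α : Type} (xs : List α) :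
    List.filterMap (fun k => xs[2 * k]?) (List.range ((xs.length + 1) / 2)) = pvEvery2 xs := by
  induction xs using pvEvery2.induct with
  | case1 => simp [pvEvery2]
  | case2 a => simp [pvEvery2, List.range_succ]
  | case3 a b t ih =>
    have hlen : (a :: b :: t).length = t.length + 2 := by simp
    rw [hlen]
    have h2 : (t.length + 2 + 1) / 2 = (t.length + 1) / 2 + 1 := by omega
    rw [h2, List.range_succ_eq_map, List.filterMap_cons, List.filterMap_map]
    have hf : ((fun k => (a :: b :: t)[2 * k]?) ∘ Nat.succ) = fun k => t[2 * k]? := by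
      funext k
      simp [Nat.mul_succ]
    rw [hf, ih]
    simp [pvEvery2]

lemma pvCast1 (n : Nat) : (((n : Int) + 2 - 1) / 2).toNat = (n + 1) / 2 := by omega

lemma pvSlice0 {α : Type} (xs : List α) :
    PySem.List.slice? xs (some 0) none 2 = some (pvEvery2 xs) := by
  rw [PySem.List.slice?]
  norm_num [PySem.List.sliceIndices]
  rw [← pvL0 xs]
  by_cases h : 0 < xs.length
  · simp only [h, if_pos]
    congr 1
    rw [pvCast1]
  · have h0 : xs.length = 0 := by omega
    simp [h0]

lemma pvSlice1 {α : Type} (xs : List α) :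
    PySem.List.slice? xs (some 1) none 2 = some (pvEvery2 xs.tail) := by
  cases xs with
  | nil =>
    rw [PySem.List.slice?]
    norm_num [PySem.List.sliceIndices, pvEvery2]
  | cons a t =>
    rw [PySem.List.slice?]
    norm_num [PySem.List.sliceIndices]
    rw [← pvL0 t]
    by_cases h : 0 < t.length
    · simp only [h, if_pos]
      congr 1
      · funext k
        have hidx : ((1 : Int) + 2 * (k : Int)).toNat = 2 * k + 1 := by omega
        rw [hidx]
        rw [show 2 * k + 1 = (2 * k) + 1 from rfl]
        simp
      · rw [pvCast1]
    · have ht : t = [] := by cases t <;> simp_all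
      subst ht
      simp

-- ---- A's fold equals the alternating specification ----
lemma pvASide (shift1 shift2 : Int) (cs : List Char) : ∀ (n : Nat) (acc : List Char),
    (PySem.List.enumerate cs (n : Int)).foldl (fun acc ic =>
      let i := ic.1
      let char := ic.2
      if PySem.Chars.islower char then
        let shift := if PySem.Int.mod i 2 = 0 then shift1 else shift2
        let new_char := Char.ofNat (PySem.Int.mod ((char.toNat : Int) - ('a'.toNat : Int) + shift) 26 + ('a'.toNat : Int)).toNat
        acc ++ [new_char]
      else if PySem.Chars.isupper char then
        let shift := if PySem.Int.mod i 2 = 0 then shift1 else shift2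
        let new_char := Char.ofNat (PySem.Int.mod ((char.toNat : Int) - ('A'.toNat : Int) + shift) 26 + ('A'.toNat : Int)).toNat
        acc ++ [new_char]
      else acc ++ [char]) acc
    = acc ++ pvSpec shift1 shift2 (n % 2 == 0) cs := by
  induction cs with
  | nil => simp [pvSpec, PySem.List.enumerate]
  | cons c t ih =>
    intro n acc
    rw [PySem.List.enumerate_cons]
    simp only [List.foldl_cons]
    have hcast : ((n : Int) + 1) = ((n + 1 : Nat) : Int) := by push_cast; ring
    rw [hcast, ih]
    have hflip : ((n + 1) % 2 == 0) = !(n % 2 == 0) := by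
      rcases Nat.mod_two_eq_zero_or_one n with h | h <;> simp [Nat.add_mod, h]
    have hmod : PySem.Int.mod ((n : Int)) 2 = ((n % 2 : Nat) : Int) := by
      exact_mod_cast PySem.Int.mod_natCast n 2
    rw [hflip]
    show (if PySem.Chars.islower c then _ else _) ++ _ = acc ++ pvSpec shift1 shift2 (n % 2 == 0) (c :: t)
    rw [pvSpec]
    by_cases hpar : n % 2 = 0
    · have h2 : PySem.Int.mod ((n : Int)) 2 = 0 := by rw [hmod, hpar]; rfl
      have hb : (n % 2 == 0) = true := by simp [hpar]
      simp only [h2, hb, if_pos, Bool.not_true]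
      unfold pvEnc
      by_cases hl : PySem.Chars.islower c
      · simp [hl]
      · by_cases hu : PySem.Chars.isupper c
        · simp [hl, hu]
        · simp [hl, hu]
    · have h2 : ¬ (PySem.Int.mod ((n : Int)) 2 = 0) := by
        rw [hmod]
        intro hx
        exact hpar (by exact_mod_cast hx)
      have hb : (n % 2 == 0) = false := by simp [hpar]
      simp only [h2, hb, if_neg, Bool.not_false]
      unfold pvEnc
      by_cases hl : PySem.Chars.islower c
      · simp [hl]
      · by_cases hu : PySem.Chars.isupper c
        · simp [hl, hu]
        · simp [hl, hu]

-- ---- B's zip/interleave equals the alternating specification ----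
-- B's interleave of the two translated slices, as a function
def pvIlv (e o : List Char) : List Char :=
  let parts := (e.zip o).foldl (fun acc xy => acc ++ [xy.1, xy.2]) []
  if o.length < e.length then parts ++ [PySem.List.pyGetD e (-1) ' '] else parts

lemma pvZipFoldAcc (l : List (Char × Char)) : ∀ (acc : List Char),
    l.foldl (fun acc xy => acc ++ [xy.1, xy.2]) acc
    = acc ++ l.foldl (fun acc xy => acc ++ [xy.1, xy.2]) [] := by
  induction l with
  | nil => simp
  | cons p rest ih =>
    intro acc
    simp only [List.foldl_cons, List.nil_append]
    rw [ih, ih [p.1, p.2], List.append_assoc]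

lemma pvIlvCons (x y : Char) (e o : List Char) :
    pvIlv (x :: e) (y :: o) = x :: y :: pvIlv e o := by
  unfold pvIlv
  simp only [List.zip_cons_cons, List.foldl_cons, List.nil_append, List.length_cons]
  by_cases h : o.length < e.length
  · have he : e ≠ [] := by
      intro h0
      subst h0
      simp at h
    have hget : PySem.List.pyGetD (x :: e) (-1) ' ' = PySem.List.pyGetD e (-1) ' ' := by
      rw [PySem.List.pyGetD_neg_one _ _ (by simp), PySem.List.pyGetD_neg_one _ _ he]
      exact List.getLast_cons he
    rw [if_pos (by omega : o.length + 1 < e.length + 1), if_pos h, hget, pvZipFoldAcc]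
    simp
  · rw [if_neg (by omega : ¬ (o.length + 1 < e.length + 1)), if_neg h, pvZipFoldAcc]
    simp

lemma pvEvery2Tail {α : Type} (b : α) (t : List α) :
    pvEvery2 (b :: t) = b :: pvEvery2 t.tail := by
  cases t <;> rfl

lemma pvBSide (shift1 shift2 : Int) (cs : List Char) :
    pvIlv ((pvEvery2 cs).map (pvEnc shift1)) ((pvEvery2 cs.tail).map (pvEnc shift2))
    = pvSpec shift1 shift2 true cs := by
  induction cs using pvEvery2.induct with
  | case1 => rfl
  | case2 a =>
    show pvIlv [pvEnc shift1 a] [] = _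
    unfold pvIlv
    simp only [List.zip_nil_right, List.foldl_nil, List.length_nil, List.length_cons,
      Nat.zero_lt_succ, if_pos]
    rw [PySem.List.pyGetD_neg_one _ _ (by simp)]
    rfl
  | case3 a b t ih =>
    show pvIlv (pvEnc shift1 a :: (pvEvery2 t).map (pvEnc shift1))
        ((pvEvery2 (b :: t)).map (pvEnc shift2)) = _
    rw [pvEvery2Tail b t]
    simp only [List.map_cons]
    rw [pvIlvCons, ih]
    rfl

-- ===== VERDICT (by name: the statement is the Claim_ definition above) =====
set_option maxRecDepth 4096 in
theorem encrypt_funcion_spec : Claim_equal_encrypt_funcion := by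
  intro text shift1 shift2 _
  unfold Spec_encrypt_funcion encrypt_funcion encrypt_funcion_alt
  rw [pvSlice0, pvSlice1]
  simp only [Option.getD_some]
  rw [pvTranslateTable, pvTranslateTable]
  have hA := pvASide shift1 shift2 text.toList 0 []
  simp only [Nat.cast_zero, List.nil_append] at hA
  rw [hA]
  have h0 : ((0 : Nat) % 2 == 0) = true := rfl
  rw [h0, ← pvBSide shift1 shift2 text.toList]
  rfl
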